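-- pv_equiv track=rewrite | github.com/OVAD-Benchmark/ovad-benchmark-code | ovadb/evaluation/attribute_evaluation.py | _tasks_from_predictions
-- ===== SOURCE A (Python) =====
-- def _tasks_from_predictions(predictions):
--     """
--     Get COCO API "tasks" (i.e. iou_type) from COCO-format predictions.
--     """
--     tasks = {"bbox"}
--     for pred in predictions:
--         if "segmentation" in pred:
--             tasks.add("segm")
--         if "keypoints" in pred:
--             tasks.add("keypoints")
--         if "att_scores" in pred:
--             tasks.add("attributes")
--     return sorted(tasks)
-- ===== SOURCE B (Python) =====
-- _KEY_TASK = {"segmentation": "segm", "keypoints": "keypoints", "att_scores": "attributes"}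
--
-- def _tasks_from_predictions(predictions):
--     """
--     Get COCO API "tasks" (i.e. iou_type) from COCO-format predictions.
--     """
--     seen = set()
--     for pred in predictions:
--         seen.update(pred)
--     return sorted({"bbox"} | {_KEY_TASK[k] for k in seen if k in _KEY_TASK})
-- ===== Notes on version B (the rewrite author's own statement) =====
-- stated objective: alternative
-- what changed: Instead of testing each prediction against the three hard-coded keys, B first unions all prediction keys into one set, then translates the collected keys through a key-to-task mapping dict and unions with {"bbox"}; the per-key membership tests disappear.
import Mathlib
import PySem

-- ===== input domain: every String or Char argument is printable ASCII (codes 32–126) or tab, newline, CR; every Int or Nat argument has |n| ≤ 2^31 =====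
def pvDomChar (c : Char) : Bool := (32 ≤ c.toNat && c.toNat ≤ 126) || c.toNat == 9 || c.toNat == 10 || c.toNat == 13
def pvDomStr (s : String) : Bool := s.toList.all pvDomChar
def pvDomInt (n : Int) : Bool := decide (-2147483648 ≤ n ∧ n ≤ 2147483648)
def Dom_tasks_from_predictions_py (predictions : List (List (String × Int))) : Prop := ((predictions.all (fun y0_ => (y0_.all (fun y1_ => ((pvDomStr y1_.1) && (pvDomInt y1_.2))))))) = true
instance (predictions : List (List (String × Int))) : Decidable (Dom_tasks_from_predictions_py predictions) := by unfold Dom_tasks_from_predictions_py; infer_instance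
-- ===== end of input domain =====

-- B collects all prediction keys into one set and translates them through a
-- key-to-task mapping dict, instead of A's per-prediction tests of three
-- hard-coded keys; same result, same cost — objective: alternative decomposition.

-- ===== PORT A =====
-- 'key in pred' on a dict is key membership in the association list.
def pvHasKey (pred : List (String × Int)) (k : String) : Bool :=
  pred.any (fun kv => kv.1 == k)

-- A's loop body (the three ifs of the for-loop).
def pvStep (tasks : PySem.Set String) (pred : List (String × Int)) : PySem.Set String :=
  let tasks := if pvHasKey pred "segmentation" then PySem.Set.add tasks "segm" else tasks
  let tasks := if pvHasKey pred "keypoints" then PySem.Set.add tasks "keypoints" else tasks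
  if pvHasKey pred "att_scores" then PySem.Set.add tasks "attributes" else tasks

def tasks_from_predictions_py (predictions : List (List (String × Int))) : List String :=
  let tasks : PySem.Set String := PySem.Set.ofList ["bbox"]
  let tasks := predictions.foldl pvStep tasks
  PySem.List.sorted tasks (fun x => x) false

-- ===== PORT B =====
-- the module-level _KEY_TASK dict
def pvKeyTask : PySem.Dict String String :=
  PySem.Dict.ofList [("segmentation", "segm"), ("keypoints", "keypoints"), ("att_scores", "attributes")]

-- seen.update(pred) adds the dict's keys to the set
def pvSeen (predictions : List (List (String × Int))) : PySem.Set String :=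
  predictions.foldl (fun s pred => PySem.Set.update s (pred.map Prod.fst)) PySem.Set.empty

-- {"bbox"} | {_KEY_TASK[k] for k in seen if k in _KEY_TASK}
-- (the comprehension is consumed only as a set, so folding over seen's element
-- list is exact; union with the singleton = adding each produced task)
def tasks_from_predictions_py_alt (predictions : List (List (String × Int))) : List String :=
  let seen := pvSeen predictions
  let tasks := seen.foldl
    (fun t k => match PySem.Dict.get? pvKeyTask k with
                | some v => PySem.Set.add t v
                | none => t)
    (PySem.Set.ofList ["bbox"])
  PySem.List.sorted tasks (fun x => x) false

-- ===== PRECONDITION & SPEC =====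
def Spec_tasks_from_predictions_py (predictions : List (List (String × Int))) (out : List String) : Prop := out = tasks_from_predictions_py_alt predictions
instance (predictions : List (List (String × Int))) (out : List String) : Decidable (Spec_tasks_from_predictions_py predictions out) := by unfold Spec_tasks_from_predictions_py; infer_instance

-- ===== CLAIM =====
def Claim_equal_tasks_from_predictions_py : Prop := ∀ (predictions : List (List (String × Int))), Dom_tasks_from_predictions_py predictions → Spec_tasks_from_predictions_py predictions (tasks_from_predictions_py predictions)

-- ===== LEMMAS AND PROOFS =====

def pvBStep (t : PySem.Set String) (k : String) : PySem.Set String :=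
  match PySem.Dict.get? pvKeyTask k with
  | some v => PySem.Set.add t v
  | none => t

-- A-side: nodup and membership of the folded set
theorem pvStep_nodup (s : PySem.Set String) (p : List (String × Int)) (h : s.Nodup) :
    (pvStep s p).Nodup := by
  unfold pvStep
  split_ifs <;> (repeat first | assumption | apply PySem.Set.nodup_add)

theorem pvFold_nodup (l : List (List (String × Int))) (s : PySem.Set String) (h : s.Nodup) :
    (l.foldl pvStep s).Nodup := by
  induction l generalizing s with
  | nil => exact h
  | cons p t ih => exact ih _ (pvStep_nodup s p h)

theorem pvStep_mem (s : PySem.Set String) (p : List (String × Int)) (x : String) :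
    x ∈ pvStep s p ↔ x ∈ s ∨ (x = "segm" ∧ pvHasKey p "segmentation") ∨
      (x = "keypoints" ∧ pvHasKey p "keypoints") ∨ (x = "attributes" ∧ pvHasKey p "att_scores") := by
  cases h1 : pvHasKey p "segmentation" <;> cases h2 : pvHasKey p "keypoints" <;>
    cases h3 : pvHasKey p "att_scores" <;>
    simp [pvStep, h1, h2, h3, PySem.Set.mem_add] <;> tauto

theorem pvFold_mem (l : List (List (String × Int))) (s : PySem.Set String) (x : String) :
    x ∈ l.foldl pvStep s ↔ x ∈ s ∨ (x = "segm" ∧ l.any (fun p => pvHasKey p "segmentation")) ∨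
      (x = "keypoints" ∧ l.any (fun p => pvHasKey p "keypoints")) ∨
      (x = "attributes" ∧ l.any (fun p => pvHasKey p "att_scores")) := by
  induction l generalizing s with
  | nil => simp
  | cons p t ih =>
    simp only [List.foldl_cons, ih, pvStep_mem, List.any_cons, Bool.or_eq_true]
    tauto

-- B-side: membership of the collected key set
theorem pvSeen_mem_aux (l : List (List (String × Int))) (s : PySem.Set String) (k : String) :
    (k ∈ l.foldl (fun s pred => PySem.Set.update s (pred.map Prod.fst)) s) ↔
      k ∈ s ∨ l.any (fun p => pvHasKey p k) := by
  induction l generalizing s with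
  | nil => simp
  | cons p t ih =>
    simp only [List.foldl_cons, ih, List.any_cons, Bool.or_eq_true, PySem.Set.mem_update,
      List.mem_map, pvHasKey, List.any_eq_true, beq_iff_eq]
    exact or_assoc

theorem pvSeen_mem (l : List (List (String × Int))) (k : String) :
    k ∈ pvSeen l ↔ l.any (fun p => pvHasKey p k) := by
  unfold pvSeen
  rw [pvSeen_mem_aux]
  simp [PySem.Set.empty]

-- what the translation dict yields
theorem pvKeyTask_get? (k x : String) :
    PySem.Dict.get? pvKeyTask k = some x ↔
      (k = "segmentation" ∧ x = "segm") ∨ (k = "keypoints" ∧ x = "keypoints") ∨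
      (k = "att_scores" ∧ x = "attributes") := by
  have hk : pvKeyTask = PySem.Dict.mk
      [("segmentation", "segm"), ("keypoints", "keypoints"), ("att_scores", "attributes")] := by decide
  rw [hk]
  by_cases h1 : k = "segmentation" <;> by_cases h2 : k = "keypoints" <;>
    by_cases h3 : k = "att_scores" <;>
    simp_all [PySem.Dict.get?] <;> tauto

theorem pvBStep_nodup (t : PySem.Set String) (k : String) (h : t.Nodup) :
    (pvBStep t k).Nodup := by
  unfold pvBStep
  cases PySem.Dict.get? pvKeyTask k with
  | none => exact h
  | some v => apply PySem.Set.nodup_add; exact h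

theorem pvBFold_nodup (ks : List String) (t : PySem.Set String) (h : t.Nodup) :
    (ks.foldl pvBStep t).Nodup := by
  induction ks generalizing t with
  | nil => exact h
  | cons k tl ih => exact ih _ (pvBStep_nodup t k h)

theorem pvBStep_mem (t : PySem.Set String) (k x : String) :
    x ∈ pvBStep t k ↔ x ∈ t ∨ PySem.Dict.get? pvKeyTask k = some x := by
  unfold pvBStep
  cases PySem.Dict.get? pvKeyTask k with
  | none => simp
  | some v => simp [PySem.Set.mem_add, eq_comm]

theorem pvBFold_mem (ks : List String) (t : PySem.Set String) (x : String) :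
    x ∈ ks.foldl pvBStep t ↔ x ∈ t ∨ ∃ k ∈ ks, PySem.Dict.get? pvKeyTask k = some x := by
  induction ks generalizing t with
  | nil => simp
  | cons k tl ih =>
    simp only [List.foldl_cons, ih, pvBStep_mem, List.mem_cons]
    constructor
    · rintro (⟨h | h⟩ | ⟨k', hk', h⟩) <;> first | exact Or.inl h | exact Or.inr ⟨_, by tauto, h⟩
    · rintro (h | ⟨k', (rfl | hk'), h⟩) <;> tauto

-- ===== VERDICT =====
theorem tasks_from_predictions_py_spec : Claim_equal_tasks_from_predictions_py := by
  intro predictions _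
  show PySem.List.sorted (predictions.foldl pvStep (PySem.Set.ofList ["bbox"])) (fun x => x) false
      = PySem.List.sorted ((pvSeen predictions).foldl pvBStep (PySem.Set.ofList ["bbox"])) (fun x => x) false
  apply PySem.List.sorted_eq_sorted_of_perm _ _ _ (fun a b h => h)
  rw [List.perm_ext_iff_of_nodup (pvFold_nodup _ _ (by decide)) (pvBFold_nodup _ _ (by decide))]
  intro x
  rw [pvFold_mem, pvBFold_mem]
  constructor
  · rintro (h | ⟨rfl, h⟩ | ⟨rfl, h⟩ | ⟨rfl, h⟩)
    · exact Or.inl h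
    · exact Or.inr ⟨"segmentation", (pvSeen_mem _ _).mpr h, by decide⟩
    · exact Or.inr ⟨"keypoints", (pvSeen_mem _ _).mpr h, by decide⟩
    · exact Or.inr ⟨"att_scores", (pvSeen_mem _ _).mpr h, by decide⟩
  · rintro (h | ⟨k, hk, hget⟩)
    · exact Or.inl h
    · rcases (pvKeyTask_get? k x).mp hget with ⟨rfl, rfl⟩ | ⟨rfl, rfl⟩ | ⟨rfl, rfl⟩ <;>
        simp_all [pvSeen_mem]
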